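-- pv_equiv track=rewrite | github.com/jeroenmaas/advent-of-code | 2024/day2.py | checkRange
-- ===== SOURCE A (Python) =====
-- def checkRange(r):
--     if r == sorted(r) or r == sorted(r, reverse=True):
--
--         success = True
--         for y in range(1, len(r)):
--             left = r[y-1]
--             right = r[y]
--             if abs(left - right) > 0 and abs(left - right) < 4:
--                continue
--             else:
--                 success = False
--                 break
--
--         if success:
--             return True
--
--     return False
-- ===== SOURCE B (Python) =====
-- def checkRange(r):
--     diffs = [b - a for a, b in zip(r, r[1:])]
--     return all(1 <= d <= 3 for d in diffs) or all(-3 <= d <= -1 for d in diffs)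
-- ===== Notes on version B (the rewrite author's own statement) =====
-- stated objective: faster
-- what changed: Replaces the two full sorts plus an indexed loop by a single pass over adjacent differences: the list is safe iff every difference is between 1 and 3, or every difference is between -3 and -1.
import Mathlib
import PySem

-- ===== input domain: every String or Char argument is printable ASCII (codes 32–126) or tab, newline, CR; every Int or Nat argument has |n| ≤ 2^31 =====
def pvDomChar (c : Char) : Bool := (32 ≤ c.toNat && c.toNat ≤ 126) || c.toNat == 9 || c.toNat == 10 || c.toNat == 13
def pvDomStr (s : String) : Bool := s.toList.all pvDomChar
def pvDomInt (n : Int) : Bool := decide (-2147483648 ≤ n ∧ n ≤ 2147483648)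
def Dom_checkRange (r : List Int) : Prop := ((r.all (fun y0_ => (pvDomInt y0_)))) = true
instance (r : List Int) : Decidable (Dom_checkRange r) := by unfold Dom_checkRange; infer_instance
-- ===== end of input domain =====

-- B replaces A's two full sorts + indexed loop by one linear pass over adjacent differences (faster).

-- ===== PORT A =====
-- the 'for y in range(1, len(r))' loop with its break: false on break, recurse on continue.
-- indices y-1 and y are always in range here, so pyGetD with default 0 is exact (Python never raises).
def checkRangeLoop (r : List Int) : List Int → Bool
  | [] => true
  | y :: ys =>
    let left := PySem.List.pyGetD r (y - 1) 0
    let right := PySem.List.pyGetD r y 0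
    if 0 < |left - right| ∧ |left - right| < 4 then checkRangeLoop r ys else false

def checkRange (r : List Int) : Bool :=
  if r = PySem.List.sorted r (fun x => x) false ∨ r = PySem.List.sorted r (fun x => x) true then
    checkRangeLoop r (PySem.List.pyRange 1 r.length 1)
  else false

-- ===== PORT B =====
def checkRange_alt (r : List Int) : Bool :=
  let diffs := (r.zip r.tail).map (fun p => p.2 - p.1)
  (diffs.all fun d => decide (1 ≤ d ∧ d ≤ 3)) || (diffs.all fun d => decide (-3 ≤ d ∧ d ≤ -1))

-- ===== PRECONDITION & SPEC =====
def Spec_checkRange (r : List Int) (out : Bool) : Prop := out = checkRange_alt r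
instance (r : List Int) (out : Bool) : Decidable (Spec_checkRange r out) := by unfold Spec_checkRange; infer_instance

-- ===== CLAIM (what is proved, stated in full; the proofs are below) =====
def Claim_equal_checkRange : Prop := ∀ (r : List Int), Dom_checkRange r → Spec_checkRange r (checkRange r)

-- ===== LEMMAS AND PROOFS =====

-- every side reduced to a statement about adjacent elements by index
def AdjP (P : Int → Int → Prop) (r : List Int) : Prop :=
  ∀ i : Nat, (h : i + 1 < r.length) → P (r[i]'(by omega)) (r[i + 1]'h)

theorem checkRangeLoop_eq_all (r : List Int) (ys : List Int) :
    checkRangeLoop r ys =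
      ys.all (fun y => decide (0 < |PySem.List.pyGetD r (y - 1) 0 - PySem.List.pyGetD r y 0| ∧
                               |PySem.List.pyGetD r (y - 1) 0 - PySem.List.pyGetD r y 0| < 4)) := by
  induction ys with
  | nil => rfl
  | cons y ys ih =>
    simp only [checkRangeLoop, List.all_cons, ih]
    split_ifs with h
    · rw [decide_eq_true h, Bool.true_and]
    · rw [decide_eq_false h, Bool.false_and]

theorem loop_iff_adj (r : List Int) :
    checkRangeLoop r (PySem.List.pyRange 1 r.length 1) = true ↔
      AdjP (fun a b => 0 < |a - b| ∧ |a - b| < 4) r := by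
  rw [checkRangeLoop_eq_all, List.all_eq_true]
  constructor
  · intro h i hi
    have hy : (i + 1 : Int) ∈ PySem.List.pyRange 1 r.length 1 := by
      rw [PySem.List.mem_pyRange_one]; constructor <;> [omega; exact_mod_cast hi]
    have := h _ hy
    rw [decide_eq_true_iff] at this
    have h1 : PySem.List.pyGetD r ((i + 1 : Int) - 1) 0 = r[i]'(by omega) := by
      rw [show ((i + 1 : Int) - 1) = (i : Int) by ring]
      rw [PySem.List.pyGetD_eq_getElem] <;> simp <;> omega
    have h2 : PySem.List.pyGetD r ((i : Int) + 1) 0 = r[i + 1]'hi := by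
      rw [show ((i : Int) + 1) = ((i + 1 : Nat) : Int) by push_cast; ring]
      rw [PySem.List.pyGetD_eq_getElem] <;> simp <;> omega
    rw [h1, h2] at this
    exact this
  · intro h y hy
    rw [PySem.List.mem_pyRange_one] at hy
    rw [decide_eq_true_iff]
    obtain ⟨i, hi⟩ : ∃ i : Nat, y = (i : Int) + 1 := ⟨(y - 1).toNat, by omega⟩
    subst hi
    have hlt : i + 1 < r.length := by omega
    have h1 : PySem.List.pyGetD r ((i : Int) + 1 - 1) 0 = r[i]'(by omega) := by
      rw [show ((i : Int) + 1 - 1) = (i : Int) by ring]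
      rw [PySem.List.pyGetD_eq_getElem] <;> simp <;> omega
    have h2 : PySem.List.pyGetD r ((i : Int) + 1) 0 = r[i + 1]'hlt := by
      rw [show ((i : Int) + 1) = ((i + 1 : Nat) : Int) by push_cast; ring]
      rw [PySem.List.pyGetD_eq_getElem] <;> simp <;> omega
    rw [h1, h2]
    exact h i hlt

theorem pairwise_iff_adj (P : Int → Int → Prop) (tr : ∀ a b c : Int, P a b → P b c → P a c)
    (r : List Int) : List.Pairwise P r ↔ AdjP P r := by
  haveI : Trans P P P := ⟨fun {a b c} h1 h2 => tr a b c h1 h2⟩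
  rw [← List.isChain_iff_pairwise]
  exact List.isChain_iff_getElem

theorem sorted_asc_iff (r : List Int) :
    r = PySem.List.sorted r (fun x => x) false ↔ AdjP (· ≤ ·) r := by
  constructor
  · intro h
    refine (pairwise_iff_adj (fun a b : Int => a ≤ b) (fun _ _ _ h1 h2 => le_trans h1 h2) r).mp ?_
    have := PySem.List.sorted_pairwise (xs := r) (key := fun x : Int => x)
    rw [← h] at this
    exact this
  · intro h
    have hp := (pairwise_iff_adj (fun a b : Int => a ≤ b) (fun _ _ _ h1 h2 => le_trans h1 h2) r).mpr h
    exact (PySem.List.sorted_eq_self_of_pairwise r (fun x => x) hp).symm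

theorem sorted_desc_iff (r : List Int) :
    r = PySem.List.sorted r (fun x => x) true ↔ AdjP (fun a b => b ≤ a) r := by
  constructor
  · intro h
    refine (pairwise_iff_adj (fun a b : Int => b ≤ a) (fun _ _ _ h1 h2 => le_trans h2 h1) r).mp ?_
    have := PySem.List.sorted_pairwise_rev (xs := r) (key := fun x : Int => x)
    rw [← h] at this
    exact this
  · intro h
    have hp := (pairwise_iff_adj (fun a b : Int => b ≤ a) (fun _ _ _ h1 h2 => le_trans h2 h1) r).mpr h
    exact (PySem.List.sorted_rev_eq_self_of_pairwise r (fun x => x) hp).symm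

theorem diffs_all_iff (P : Int → Prop) [DecidablePred P] (r : List Int) :
    (((r.zip r.tail).map (fun p => p.2 - p.1)).all fun d => decide (P d)) = true ↔
      AdjP (fun a b => P (b - a)) r := by
  rw [List.all_eq_true]
  constructor
  · intro h i hi
    have hz : i < (r.zip r.tail).length := by
      simp [List.length_zip, List.length_tail]; omega
    have hmem : ((r.zip r.tail)[i]'hz).2 - ((r.zip r.tail)[i]'hz).1 ∈
        (r.zip r.tail).map (fun p => p.2 - p.1) := by
      exact List.mem_map.mpr ⟨_, List.getElem_mem hz, rfl⟩
    have := h _ hmem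
    rw [decide_eq_true_iff] at this
    simpa [List.getElem_zip, List.getElem_tail] using this
  · intro h d hd
    rw [decide_eq_true_iff]
    obtain ⟨p, hp, rfl⟩ := List.mem_map.mp hd
    obtain ⟨i, hz, rfl⟩ := List.mem_iff_getElem.mp hp
    have hi : i + 1 < r.length := by
      simp [List.length_zip, List.length_tail] at hz; omega
    have := h i hi
    simpa [List.getElem_zip, List.getElem_tail] using this

-- ===== VERDICT (by name: the statement is the Claim_ definition above) =====
theorem checkRange_spec : Claim_equal_checkRange := by
  intro r _
  unfold Spec_checkRange checkRange checkRange_alt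
  rw [Bool.eq_iff_iff]
  constructor
  · intro h
    split_ifs at h with hs
    rw [loop_iff_adj] at h
    rw [Bool.or_eq_true]
    cases hs with
    | inl hasc =>
      left
      rw [diffs_all_iff (fun d => 1 ≤ d ∧ d ≤ 3)]
      intro i hi
      have hle : (r[i]'(by omega)) ≤ (r[i + 1]'hi) := (sorted_asc_iff r).mp hasc i hi
      obtain ⟨ha1, ha2⟩ := h i hi
      rcases abs_cases ((r[i]'(by omega)) - (r[i + 1]'hi)) with ⟨h1, h2⟩ | ⟨h1, h2⟩ <;>
        (rw [h1] at ha1 ha2; exact ⟨by omega, by omega⟩)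
    | inr hdesc =>
      right
      rw [diffs_all_iff (fun d => -3 ≤ d ∧ d ≤ -1)]
      intro i hi
      have hle : (r[i + 1]'hi) ≤ (r[i]'(by omega)) := (sorted_desc_iff r).mp hdesc i hi
      obtain ⟨ha1, ha2⟩ := h i hi
      rcases abs_cases ((r[i]'(by omega)) - (r[i + 1]'hi)) with ⟨h1, h2⟩ | ⟨h1, h2⟩ <;>
        (rw [h1] at ha1 ha2; exact ⟨by omega, by omega⟩)
  · intro h
    rw [Bool.or_eq_true] at h
    have key : (r = PySem.List.sorted r (fun x => x) false ∨
                r = PySem.List.sorted r (fun x => x) true) ∧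
               AdjP (fun a b => 0 < |a - b| ∧ |a - b| < 4) r := by
      cases h with
      | inl h =>
        rw [diffs_all_iff (fun d => 1 ≤ d ∧ d ≤ 3)] at h
        refine ⟨Or.inl ((sorted_asc_iff r).mpr ?_), ?_⟩
        · intro i hi
          obtain ⟨hd1, hd2⟩ := h i hi
          show (r[i]'(by omega)) ≤ (r[i + 1]'hi)
          omega
        · intro i hi
          obtain ⟨hd1, hd2⟩ := h i hi
          refine ⟨?_, ?_⟩ <;>
            (rcases abs_cases ((r[i]'(by omega)) - (r[i + 1]'hi)) with ⟨h1, h2⟩ | ⟨h1, h2⟩ <;>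
              (rw [h1]; omega))
      | inr h =>
        rw [diffs_all_iff (fun d => -3 ≤ d ∧ d ≤ -1)] at h
        refine ⟨Or.inr ((sorted_desc_iff r).mpr ?_), ?_⟩
        · intro i hi
          obtain ⟨hd1, hd2⟩ := h i hi
          show (r[i + 1]'hi) ≤ (r[i]'(by omega))
          omega
        · intro i hi
          obtain ⟨hd1, hd2⟩ := h i hi
          refine ⟨?_, ?_⟩ <;>
            (rcases abs_cases ((r[i]'(by omega)) - (r[i + 1]'hi)) with ⟨h1, h2⟩ | ⟨h1, h2⟩ <;>
              (rw [h1]; omega))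
    rw [if_pos key.1, loop_iff_adj]
    exact key.2
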